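-- pv_equiv track=rewrite | github.com/gaesa/dotfiles | .local/share/python/lib/my_utils/seq.py | skip_last
-- ===== SOURCE A (Python) =====
-- from collections import deque
-- from typing import Any, Callable, Collection, Iterable, Iterator, TypeVar
--
-- _T = TypeVar("_T")
--
-- def for_each(operation: Callable[[_T], Any], iterable: Iterable[_T]) -> None:
--     """Like `map`, but doesn't construct an iterator."""
--     for ele in iterable:
--         operation(ele)
--
-- def skip_last(iterable: Iterable[_T], k: int = 1) -> Iterator[_T]:
--     """
--     Returns an iterator that skips the last `k` elements from the given iterable.
--
--     Parameters:
--         `iterable`: The input iterable.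
--         `k`: Number of elements to skip from the end. Default is 1.
--
--     Returns:
--         `Iterator[_T]`: Iterator with the specified elements skipped.
--
--     Raises:
--         `ValueError`: If `k` is negative.
--
--     Example:
--         >>> list(skip_last([1, 2, 3, 4, 5], 2))
--         [1, 2, 3]
--     """
--     if k < 0:
--         raise ValueError("'k' must be greater than or equal to zero")
--     elif k == 0:
--         return iter(iterable)
--     else:
--         it, window = iter(iterable), deque(maxlen=k)
--         try:
--             for_each(lambda _: window.append(next(it)), range(k))
--             for ele in it:
--                 yield window.popleft()
--                 window.append(ele)
--         except StopIteration:
--             return iter(())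
-- ===== SOURCE B (Python) =====
-- def skip_last(iterable, k=1):
--     if k < 0:
--         raise ValueError("'k' must be greater than or equal to zero")
--     items = list(iterable)
--     yield from items[:-k]
-- ===== Notes on version B (the rewrite author's own statement) =====
-- stated objective: simpler
-- what changed: Replaces the streaming deque window (prefill k, then yield-popleft/append loop with StopIteration handling) with materializing the input once and yielding the slice items[:-k], whose semantics ([:-0] empty, over-long k empty) reproduce A's behaviour without any special cases.
import Mathlib
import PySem

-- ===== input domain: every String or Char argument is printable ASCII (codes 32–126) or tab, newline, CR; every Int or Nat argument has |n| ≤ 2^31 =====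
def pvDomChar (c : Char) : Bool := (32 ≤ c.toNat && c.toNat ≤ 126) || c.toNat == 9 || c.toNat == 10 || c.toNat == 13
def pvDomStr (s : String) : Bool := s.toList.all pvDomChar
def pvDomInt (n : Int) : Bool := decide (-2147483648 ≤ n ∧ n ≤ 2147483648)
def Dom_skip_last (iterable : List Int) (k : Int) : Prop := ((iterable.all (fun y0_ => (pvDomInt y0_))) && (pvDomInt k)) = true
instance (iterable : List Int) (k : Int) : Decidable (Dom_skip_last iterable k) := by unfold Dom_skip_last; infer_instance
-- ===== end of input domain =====

-- B materializes the input and slices items[:-k] instead of A's streaming deque window; return-value equivalence on k ≥ 0.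
-- ===== PORT A =====
-- A is a generator: the `if k == 0: return iter(iterable)` executes inside the
-- generator body, so it yields nothing; fewer than k elements → StopIteration
-- caught → nothing yielded; otherwise yield window.popleft(); window.append(ele).
def skip_last (iterable : List Int) (k : Int) : List Int :=
  if k < 0 then []            -- ValueError; excluded by Pre_skip_last
  else if k = 0 then []       -- `return iter(iterable)` inside a generator yields nothing
  else
    if iterable.length < k.toNat then []   -- StopIteration while prefilling the window
    else
      let window := iterable.take k.toNat  -- for_each(lambda _: window.append(next(it)), range(k))
      let rest := iterable.drop k.toNat
      (rest.foldl (fun (s : List Int × List Int) ele =>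
          (s.1 ++ [s.2.headI], s.2.tail ++ [ele])) ([], window)).1

-- ===== PORT B =====
def skip_last_alt (iterable : List Int) (k : Int) : List Int :=
  -- if k < 0: raise ValueError (excluded by Pre_); yield from items[:-k]
  PySem.List.slice iterable none (some (-k))

-- ===== PRECONDITION & SPEC =====
-- Pre_ excludes exactly k < 0, where both A and B raise ValueError.
def Pre_skip_last (iterable : List Int) (k : Int) : Prop := 0 ≤ k
instance (iterable : List Int) (k : Int) : Decidable (Pre_skip_last iterable k) := by unfold Pre_skip_last; infer_instance
def pvWitness_skip_last : List Int × Int := ([1, 2, 3, 4, 5], 2)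

def Spec_skip_last (iterable : List Int) (k : Int) (out : List Int) : Prop := out = skip_last_alt iterable k
instance (iterable : List Int) (k : Int) (out : List Int) : Decidable (Spec_skip_last iterable k out) := by unfold Spec_skip_last; infer_instance

-- ===== CLAIM (what is proved, stated in full; the proofs are below) =====
def Claim_equal_skip_last : Prop := ∀ (iterable : List Int) (k : Int), Dom_skip_last iterable k → Pre_skip_last iterable k → Spec_skip_last iterable k (skip_last iterable k)

-- ===== LEMMAS AND PROOFS =====

-- A's window loop invariant: starting from accumulator `acc` and a nonempty window,
-- the yielded list is acc followed by the first |rest| elements of window ++ rest.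
theorem skip_last_fold_inv (rest : List Int) :
    ∀ (acc window : List Int), window ≠ [] →
      (rest.foldl (fun (s : List Int × List Int) ele =>
          (s.1 ++ [s.2.headI], s.2.tail ++ [ele])) (acc, window)).1
        = acc ++ (window ++ rest).take rest.length := by
  induction rest with
  | nil => intro acc window _; simp
  | cons e rs ih =>
    intro acc window hw
    obtain ⟨h, t, rfl⟩ := List.exists_cons_of_ne_nil hw
    simp only [List.foldl_cons, List.headI_cons, List.tail_cons]
    by_cases ht : t ++ [e] = []
    · simp at ht
    · rw [ih (acc ++ [h]) (t ++ [e]) ht]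
      simp [List.take_succ_cons, List.append_assoc]

-- ===== VERDICT (by name: the statement is the Claim_ definition above) =====
theorem skip_last_spec : Claim_equal_skip_last := by
  intro xs k _ hk
  unfold Pre_skip_last at hk
  unfold Spec_skip_last skip_last skip_last_alt
  rw [if_neg (by omega)]
  by_cases hk0 : k = 0
  · subst hk0; simp [PySem.List.slice, PySem.List.clampIdx]
  · rw [if_neg hk0]
    have hkpos : 0 < k.toNat := by omega
    have hslice : PySem.List.slice xs none (some (-k)) = xs.take (xs.length - k.toNat) := by
      have := PySem.List.slice_to_neg_natCast (xs := xs) (k := k.toNat) hkpos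
      rwa [Int.toNat_of_nonneg hk] at this
    rw [hslice]
    by_cases hlen : xs.length < k.toNat
    · rw [if_pos hlen]
      have : xs.length - k.toNat = 0 := by omega
      simp [this]
    · rw [if_neg hlen]
      have hw : xs.take k.toNat ≠ [] := by
        apply List.ne_nil_of_length_pos
        rw [List.length_take]
        omega
      rw [skip_last_fold_inv (xs.drop k.toNat) [] (xs.take k.toNat) hw]
      simp [List.length_drop]
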